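-- pv_equiv track=rewrite | github.com/AntoChriswin/DAA-assignment-4 | 34. Minimum Addition to Make Integer Beautiful.py | min_non_negative_integer_to_make_beautiful
-- ===== SOURCE A (Python) =====
-- def min_non_negative_integer_to_make_beautiful(n, target):
--     def digit_sum(x):
--         return sum(int(d) for d in str(x))
--
--     # If the initial digit sum of n is already <= target, return 0
--     if digit_sum(n) <= target:
--         return 0
--
--     # Otherwise, find the minimum x to make n + x beautiful
--     x = 0
--     factor = 1
--
--     while digit_sum(n + x) > target:
--         # Add to x to make n "round up" to the next power of 10
--         x += factor
--         factor *= 10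
--
--         # Ensure to round n to the nearest higher number like 10, 100, etc.
--         while (n + x) % factor != 0:
--             x += factor // 10
--
--     return x
-- ===== SOURCE B (Python) =====
-- def min_non_negative_integer_to_make_beautiful(n, target):
--     def digit_sum(x):
--         return sum(int(d) for d in str(x))
--
--     # Scan the round-up candidates directly: for each power of ten p,
--     # the smallest multiple of p that is >= n.  The first candidate whose
--     # digit sum fits is the answer (p = 1 gives n itself, i.e. adding 0).
--     p = 1
--     while True:
--         m = -(-n // p) * p
--         if digit_sum(m) <= target:
--             return m - n
--         p *= 10
-- ===== Notes on version B (the rewrite author's own statement) =====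
-- stated objective: simpler
-- what changed: A builds the addend x incrementally with nested while loops (add factor, then an inner loop bumping n+x up to the next multiple of factor); B has a single loop that, for each power of ten p, computes the round-up candidate ceil(n/p)*p by arithmetic and returns the first whose digit sum is within target.
import Mathlib
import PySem

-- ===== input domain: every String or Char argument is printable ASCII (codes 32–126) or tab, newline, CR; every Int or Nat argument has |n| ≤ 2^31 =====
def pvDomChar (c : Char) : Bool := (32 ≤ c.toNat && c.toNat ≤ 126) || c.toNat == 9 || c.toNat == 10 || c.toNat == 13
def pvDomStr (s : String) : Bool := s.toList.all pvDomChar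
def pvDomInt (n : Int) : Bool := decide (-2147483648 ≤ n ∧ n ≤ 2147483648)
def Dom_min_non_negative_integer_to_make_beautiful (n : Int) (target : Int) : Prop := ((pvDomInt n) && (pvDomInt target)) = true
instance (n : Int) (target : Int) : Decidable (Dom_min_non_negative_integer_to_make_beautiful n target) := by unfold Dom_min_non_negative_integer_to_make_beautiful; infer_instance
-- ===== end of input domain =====

-- B replaces A's nested rounding loops by a single scan over the round-up candidates
-- ceil(n/10^k)*10^k, computed arithmetically; objective: simpler.

-- ===== PORT A =====
-- shared helper: Python's  sum(int(d) for d in str(x))  (identical in Source A and Source B);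
-- int(d) is PySem.Int.ofChars? [d]; `.getD 0` is only reached where Python would raise
-- (the '-' of a negative number), which Pre_ excludes.
def pyDigitSum (x : Int) : Int :=
  ((PySem.Int.toChars x).map (fun c => (PySem.Int.ofChars? [c]).getD 0)).sum

-- inner while loop of A:  while (n + x) % factor != 0: x += factor // 10
-- (fuel 10 is enough everywhere inside Pre_; the proof never reaches fuel 0)
def aInner (n : Int) : Nat → Int → Int → Int
  | 0, x, _ => x
  | f + 1, x, factor =>
      if PySem.Int.mod (n + x) factor ≠ 0 then
        aInner n f (x + PySem.Int.floordiv factor 10) factor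
      else x

-- outer while loop of A:  while digit_sum(n + x) > target: x += factor; factor *= 10; <inner>
def aOuter (n target : Int) : Nat → Int → Int → Int
  | 0, x, _ => x
  | f + 1, x, factor =>
      if target < pyDigitSum (n + x) then
        aOuter n target f (aInner n 10 (x + factor) (factor * 10)) (factor * 10)
      else x

def min_non_negative_integer_to_make_beautiful (n : Int) (target : Int) : Int :=
  if pyDigitSum n ≤ target then 0
  else aOuter n target 12 0 1

-- ===== PORT B =====
-- Source B's loop:  while True: m = -(-n // p) * p; if digit_sum(m) <= target: return m - n; p *= 10
-- (fuel 13 is enough everywhere inside Pre_; the proof never reaches fuel 0)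
def bLoop (n target : Int) : Nat → Int → Int
  | 0, _ => 0
  | f + 1, p =>
      let m := -(PySem.Int.floordiv (-n) p) * p
      if pyDigitSum m ≤ target then m - n
      else bLoop n target f (p * 10)

def min_non_negative_integer_to_make_beautiful_alt (n : Int) (target : Int) : Int :=
  bLoop n target 13 1

-- ===== PRECONDITION & SPEC =====
-- Pre_ excludes exactly the inputs where A does not return: n < 0 (digit_sum hits the '-'
-- sign and int(d) raises ValueError) and target below the reachable digit sums (target ≤ 0
-- with n > 0, or target < 0 with n = 0), where A's while loop never terminates.
def Pre_min_non_negative_integer_to_make_beautiful (n : Int) (target : Int) : Prop :=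
  0 ≤ n ∧ (1 ≤ target ∨ (n = 0 ∧ 0 ≤ target))
instance (n : Int) (target : Int) : Decidable (Pre_min_non_negative_integer_to_make_beautiful n target) := by unfold Pre_min_non_negative_integer_to_make_beautiful; infer_instance

def pvWitness_min_non_negative_integer_to_make_beautiful : Int × Int := (45, 1)

def Spec_min_non_negative_integer_to_make_beautiful (n : Int) (target : Int) (out : Int) : Prop := out = min_non_negative_integer_to_make_beautiful_alt n target
instance (n : Int) (target : Int) (out : Int) : Decidable (Spec_min_non_negative_integer_to_make_beautiful n target out) := by unfold Spec_min_non_negative_integer_to_make_beautiful; infer_instance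

-- ===== CLAIM (what is proved, stated in full; the proofs are below) =====
def Claim_equal_min_non_negative_integer_to_make_beautiful : Prop := ∀ (n : Int) (target : Int), Dom_min_non_negative_integer_to_make_beautiful n target → Pre_min_non_negative_integer_to_make_beautiful n target → Spec_min_non_negative_integer_to_make_beautiful n target (min_non_negative_integer_to_make_beautiful n target)

-- ===== LEMMAS AND PROOFS =====

-- value of a decimal digit character under the port's char-to-int step
lemma digit_val (d : Nat) (hd : d < 10) :
    (PySem.Int.ofChars? [Nat.digitChar d]).getD 0 = (d : Int) := by
  interval_cases d <;> decide

-- pyDigitSum on a natural number, through Nat.toDigits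
def dsN (m : Nat) : Int :=
  ((Nat.toDigits 10 m).map (fun c => (PySem.Int.ofChars? [c]).getD 0)).sum

lemma pyDigitSum_natCast (m : Nat) : pyDigitSum (m : Int) = dsN m := by
  unfold pyDigitSum PySem.Int.toChars dsN
  rw [if_neg (by omega)]
  norm_num

lemma dsN_mul10 (m : Nat) (hm : 0 < m) : dsN (m * 10) = dsN m := by
  unfold dsN
  rw [Nat.toDigits_of_base_le (by norm_num) (by omega)]
  have h1 : m * 10 / 10 = m := by omega
  have h2 : m * 10 % 10 = 0 := by omega
  rw [h1, h2, List.map_append, List.sum_append]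
  simp [digit_val 0 (by norm_num)]

lemma dsN_succ (m : Nat) (hm : m % 10 ≠ 9) : dsN (m + 1) = dsN m + 1 := by
  by_cases h : m + 1 < 10
  · unfold dsN
    rw [Nat.toDigits_of_lt_base h, Nat.toDigits_of_lt_base (by omega)]
    simp [digit_val (m + 1) (by omega), digit_val m (by omega)]
  · have hm10 : 10 ≤ m := by omega
    unfold dsN
    rw [Nat.toDigits_of_base_le (by norm_num) (by omega),
        Nat.toDigits_of_base_le (by norm_num) hm10]
    have h1 : (m + 1) / 10 = m / 10 := by omega
    have h2 : (m + 1) % 10 = m % 10 + 1 := by omega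
    rw [h1, h2, List.map_append, List.map_append, List.sum_append, List.sum_append]
    simp only [List.map_cons, List.map_nil, List.sum_cons, List.sum_nil, add_zero]
    rw [digit_val (m % 10 + 1) (by omega), digit_val (m % 10) (by omega)]
    push_cast
    ring

lemma ds_succ (b : Int) (hb : 0 ≤ b) (h : b % 10 ≠ 9) :
    pyDigitSum (b + 1) = pyDigitSum b + 1 := by
  obtain ⟨m, rfl⟩ := Int.eq_ofNat_of_zero_le hb
  have hm : m % 10 ≠ 9 := by omega
  rw [show ((m : Int) + 1) = ((m + 1 : Nat) : Int) by push_cast; ring,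
      pyDigitSum_natCast, pyDigitSum_natCast, dsN_succ m hm]

lemma ds_mul10 (b : Int) (hb : 0 < b) : pyDigitSum (b * 10) = pyDigitSum b := by
  obtain ⟨m, rfl⟩ := Int.eq_ofNat_of_zero_le (le_of_lt hb)
  have hm : 0 < m := by omega
  rw [show ((m : Int) * 10) = ((m * 10 : Nat) : Int) by push_cast; ring,
      pyDigitSum_natCast, pyDigitSum_natCast, dsN_mul10 m hm]

lemma ds_mul_pow (b : Int) (hb : 0 < b) (k : Nat) :
    pyDigitSum (b * 10 ^ k) = pyDigitSum b := by
  induction k with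
  | zero => simp
  | succ k ih =>
      rw [pow_succ, ← mul_assoc, ds_mul10 (b * 10 ^ k) (by positivity), ih]

lemma ds_one_pow (k : Nat) : pyDigitSum ((10 : Int) ^ k) = 1 := by
  have h := ds_mul_pow 1 one_pos k
  have h1 : pyDigitSum 1 = 1 := by decide
  simpa [h1] using h

lemma ds_carry (b t : Int) (k : Nat) (hb : 1 ≤ b)
    (h1 : t < pyDigitSum (b * 10 ^ k)) (h2 : pyDigitSum ((b + 1) * 10 ^ k) ≤ t) :
    (10 : Int) ∣ (b + 1) := by
  by_contra hnd
  have hb9 : b % 10 ≠ 9 := by omega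
  have hs := ds_succ b (by omega) hb9
  rw [ds_mul_pow b (by omega)] at h1
  rw [ds_mul_pow (b + 1) (by omega)] at h2
  omega

-- two multiples of p within distance < p of each other are equal
lemma window_eq (p a b : Int) (hp : 0 < p) (ha : p ∣ a) (hb : p ∣ b)
    (h1 : a < b + p) (h2 : b < a + p) : a = b := by
  obtain ⟨ca, rfl⟩ := ha
  obtain ⟨cb, rfl⟩ := hb
  have hc1 : ca < cb + 1 := by
    have h : p * ca < p * (cb + 1) := by linarith [h1]
    exact lt_of_mul_lt_mul_left h (le_of_lt hp)
  have hc2 : cb < ca + 1 := by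
    have h : p * cb < p * (ca + 1) := by linarith [h2]
    exact lt_of_mul_lt_mul_left h (le_of_lt hp)
  have : ca = cb := by omega
  rw [this]

-- B's computed candidate is the round-up of n to a multiple of p
lemma bstep_m (n p : Int) (hp : 0 < p) :
    p ∣ (-(PySem.Int.floordiv (-n) p) * p) ∧ n ≤ -(PySem.Int.floordiv (-n) p) * p ∧
      -(PySem.Int.floordiv (-n) p) * p < n + p := by
  have h := (PySem.Int.neg_floordiv_neg_eq_iff_of_pos (a := n) (b := p)
      (q := -(PySem.Int.floordiv (-n) p)) hp).mp rfl
  refine ⟨dvd_mul_left p _, h.2, ?_⟩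
  have h1 : (-(PySem.Int.floordiv (-n) p) - 1) * p
      = -(PySem.Int.floordiv (-n) p) * p - p := by ring
  linarith [h.1, h1 ▸ h.1]

-- the smallest multiple of Q strictly above n
lemma next_strict (n Q : Int) (hQ : 0 < Q) :
    Q ∣ (n - n % Q + Q) ∧ n < n - n % Q + Q ∧ n - n % Q + Q ≤ n + Q := by
  have hmod1 : 0 ≤ n % Q := Int.emod_nonneg n (ne_of_gt hQ)
  have hmod2 : n % Q < Q := Int.emod_lt_of_pos n hQ
  have hdm : Q * (n / Q) + n % Q = n := Int.mul_ediv_add_emod n Q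
  refine ⟨⟨n / Q + 1, by linarith [hdm]⟩, by omega, by omega⟩

-- A's inner loop rounds n + x up to the next multiple of q*10 (the target W being
-- a multiple of q*10 at q-divisible distance, within window and fuel)
lemma inner_spec (n : Int) :
    ∀ (f : Nat) (x q W : Int), 0 < q → (q * 10) ∣ W → n + x ≤ W →
      W < n + x + q * 10 → q ∣ (W - (n + x)) → W ≤ n + x + (f : Int) * q →
      n + aInner n f x (q * 10) = W := by
  intro f
  induction f with
  | zero =>
      intro x q W hq hWd hge hlt hqd hfuel
      simp only [aInner]
      simp only [Nat.cast_zero, zero_mul, add_zero] at hfuel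
      omega
  | succ f ih =>
      intro x q W hq hWd hge hlt hqd hfuel
      simp only [aInner]
      by_cases hdv : (q * 10) ∣ (n + x)
      · rw [if_neg (by simp [PySem.Int.mod_eq_zero_iff_dvd]; exact hdv)]
        exact (window_eq (q * 10) W (n + x) (by positivity) hWd hdv (by omega) (by omega)).symm ▸ by omega
      · rw [if_pos (by simp [PySem.Int.mod_eq_zero_iff_dvd]; exact hdv)]
        have hfd : PySem.Int.floordiv (q * 10) 10 = q := by
          rw [PySem.Int.floordiv_eq_ediv_of_pos (by norm_num)]
          exact Int.mul_ediv_cancel q (by norm_num)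
        rw [hfd]
        have hne : n + x ≠ W := fun h => hdv (h ▸ hWd)
        have hgt : n + x < W := lt_of_le_of_ne hge hne
        have hstep : n + x + q ≤ W := by
          have := Int.le_of_dvd (by omega) hqd
          omega
        refine ih (x + q) q W hq hWd (by omega) (by omega) ?_ ?_
        · have : W - (n + (x + q)) = (W - (n + x)) - q := by ring
          rw [this]
          exact dvd_sub hqd (dvd_refl q)
        · push_cast at hfuel ⊢
          linarith

-- invariant carried by A's outer loop at level k (value v = n + x, factor = 10^k)
def strictUp (n : Int) (k : Nat) (v : Int) : Prop :=
  (10 : Int) ^ k ∣ v ∧ n < v ∧ v ≤ n + 10 ^ k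

def InvA (n target : Int) (k : Nat) (v : Int) : Prop :=
  strictUp n k v ∨ ∃ s, strictUp n k s ∧ v = s + 10 ^ k ∧ target < pyDigitSum s

lemma aOuter_succ (n target : Int) (f : Nat) (x factor : Int) :
    aOuter n target (f + 1) x factor =
      if target < pyDigitSum (n + x) then
        aOuter n target f (aInner n 10 (x + factor) (factor * 10)) (factor * 10)
      else x := rfl

lemma bLoop_succ (n target : Int) (f : Nat) (p : Int) :
    bLoop n target (f + 1) p =
      if pyDigitSum (-(PySem.Int.floordiv (-n) p) * p) ≤ target
      then -(PySem.Int.floordiv (-n) p) * p - n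
      else bLoop n target f (p * 10) := rfl

lemma main_loop (n target : Int) (hn : 1 ≤ n) (hnb : n ≤ 2147483648) (ht : 1 ≤ target)
    (hds : target < pyDigitSum n) :
    ∀ (j : Nat), ∀ (k : Nat) (v : Int), k + j = 11 → 1 ≤ k → InvA n target k v →
      aOuter n target (j + 1) (v - n) ((10 : Int) ^ k)
        = bLoop n target (j + 2) ((10 : Int) ^ k) := by
  intro j
  induction j with
  | zero =>
      intro k v hk11 hk hInv
      have hkeq : k = 11 := by omega
      subst hkeq
      have hPval : ((10 : Int) ^ 11) = 100000000000 := by norm_num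
      have hv : v = (10 : Int) ^ 11 := by
        rcases hInv with ⟨hd, h1, h2⟩ | ⟨s, ⟨hd, h1, h2⟩, hveq, hdss⟩
        · exact window_eq _ v _ (by positivity) hd dvd_rfl (by omega) (by omega)
        · exfalso
          have hs : s = (10 : Int) ^ 11 :=
            window_eq _ s _ (by positivity) hd dvd_rfl (by omega) (by omega)
          rw [hs, ds_one_pow] at hdss
          omega
      have hdv : pyDigitSum v = 1 := by rw [hv, ds_one_pow]
      -- A returns v - n
      rw [aOuter_succ n target 0, show n + (v - n) = v by ring, if_neg (by omega)]
      -- B returns m - n with m = v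
      rw [show (0:Nat) + 2 = 1 + 1 by rfl, bLoop_succ n target 1]
      obtain ⟨hmd, hmge, hmlt⟩ := bstep_m n ((10 : Int) ^ 11) (by positivity)
      have hm : -(PySem.Int.floordiv (-n) ((10 : Int) ^ 11)) * (10 : Int) ^ 11 = v := by
        refine window_eq _ _ _ (by positivity) hmd (hv ▸ dvd_rfl) ?_ ?_ <;> omega
      rw [hm, if_pos (by omega)]
  | succ j ih =>
      intro k v hk11 hk hInv
      have hP : (0 : Int) < 10 ^ k := by positivity
      obtain ⟨hmd, hmge, hmlt⟩ := bstep_m n ((10 : Int) ^ k) hP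
      have hvd : (10 : Int) ^ k ∣ v := by
        rcases hInv with ⟨hd, _, _⟩ | ⟨s, ⟨hd, _, _⟩, hveq, _⟩
        · exact hd
        · exact hveq ▸ dvd_add hd dvd_rfl
      have hvgt : n < v := by
        rcases hInv with ⟨_, h1, _⟩ | ⟨s, ⟨_, h1, _⟩, hveq, _⟩
        · exact h1
        · omega
      have hvle : v ≤ n + 2 * 10 ^ k := by
        rcases hInv with ⟨_, _, h2⟩ | ⟨s, ⟨_, _, h2⟩, hveq, _⟩ <;> omega
      by_cases hcase : target < pyDigitSum v
      · -- both sides recurse to level k+1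
        have hmds : target < pyDigitSum (-(PySem.Int.floordiv (-n) ((10:Int)^k)) * (10:Int)^k) := by
          by_cases hdn : (10 : Int) ^ k ∣ n
          · have he : -(PySem.Int.floordiv (-n) ((10:Int)^k)) * (10:Int)^k = n :=
              window_eq _ _ _ hP hmd hdn (by omega) (by omega)
            rw [he]; exact hds
          · have hmn : n < -(PySem.Int.floordiv (-n) ((10:Int)^k)) * (10:Int)^k :=
              lt_of_le_of_ne hmge (fun h => hdn (h ▸ hmd))
            rcases hInv with ⟨hd, h1, h2⟩ | ⟨s, ⟨hd, h1, h2⟩, hveq, hdss⟩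
            · have he : -(PySem.Int.floordiv (-n) ((10:Int)^k)) * (10:Int)^k = v :=
                window_eq _ _ _ hP hmd hd (by omega) (by omega)
              rw [he]; exact hcase
            · have he : -(PySem.Int.floordiv (-n) ((10:Int)^k)) * (10:Int)^k = s :=
                window_eq _ _ _ hP hmd hd (by omega) (by omega)
              rw [he]; exact hdss
        -- the strict round-up T at level k+1
        have hQ : (0 : Int) < 10 ^ k * 10 := by positivity
        obtain ⟨hTd, hTgt, hTle⟩ := next_strict n ((10 : Int) ^ k * 10) hQ
        set T := n - n % ((10 : Int) ^ k * 10) + (10 : Int) ^ k * 10 with hTdef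
        have hTdk : (10 : Int) ^ k ∣ T := dvd_trans (Dvd.intro 10 rfl) hTd
        -- the value W the inner loop reaches, and its invariant at k+1
        have hW : ∃ W, ((10:Int)^k * 10) ∣ W ∧ v + 10 ^ k ≤ W ∧ W < v + 10 ^ k + 10 ^ k * 10 ∧
            InvA n target (k + 1) W := by
          by_cases hTs : v + 10 ^ k ≤ T
          · refine ⟨T, hTd, hTs, by omega, Or.inl ?_⟩
            refine ⟨by rw [pow_succ]; exact hTd, hTgt, ?_⟩
            rw [pow_succ]; omega
          · -- T ≤ v, so T is v or the s of the skip case; W = T + 10^(k+1)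
            have hTv : T ≤ v := by
              by_contra hTv'
              rw [not_le] at hTv'
              have hd2 : (10:Int)^k ∣ (T - v) := dvd_sub hTdk hvd
              have := Int.le_of_dvd (by omega) hd2
              omega
            have hdT : target < pyDigitSum T := by
              rcases hInv with ⟨hd, h1, h2⟩ | ⟨s, ⟨hd, h1, h2⟩, hveq, hdss⟩
              · have he : T = v := window_eq _ _ _ hP hTdk hd (by omega) (by omega)
                rw [he]; exact hcase
              · by_cases hTs' : T ≤ s
                · have he : T = s := window_eq _ _ _ hP hTdk hd (by omega) (by omega)
                  rw [he]; exact hdss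
                · have he : T = v := window_eq _ _ _ hP hTdk hvd (by omega) (by omega)
                  rw [he]; exact hcase
            refine ⟨T + 10 ^ k * 10, dvd_add hTd dvd_rfl, by omega, by omega, Or.inr ?_⟩
            refine ⟨T, ⟨by rw [pow_succ]; exact hTd, hTgt, by rw [pow_succ]; omega⟩, by rw [pow_succ], hdT⟩
        obtain ⟨W, hWd, hWge, hWlt, hWInv⟩ := hW
        -- A's step
        rw [aOuter_succ n target (j + 1), show n + (v - n) = v by ring, if_pos hcase]
        have hinner : n + aInner n 10 ((v - n) + (10:Int)^k) ((10:Int)^k * 10) = W := by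
          refine inner_spec n 10 ((v - n) + (10:Int)^k) ((10:Int)^k) W hP hWd ?_ ?_ ?_ ?_
          · rw [show n + (v - n + (10:Int)^k) = v + 10 ^ k by ring]; exact hWge
          · rw [show n + (v - n + (10:Int)^k) = v + 10 ^ k by ring]; exact hWlt
          · rw [show W - (n + (v - n + (10:Int)^k)) = W - (v + 10 ^ k) by ring]
            refine dvd_sub (dvd_trans (Dvd.intro 10 rfl) hWd) (dvd_add hvd dvd_rfl)
          · rw [show n + (v - n + (10:Int)^k) = v + 10 ^ k by ring]
            push_cast
            omega
        have hinner' : aInner n 10 ((v - n) + (10:Int)^k) ((10:Int)^k * 10) = W - n := by omega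
        rw [hinner']
        -- B's step
        rw [show j + 1 + 2 = (j + 2) + 1 by omega, bLoop_succ n target (j + 2), if_neg (by omega)]
        -- recurse
        have := ih (k + 1) W (by omega) (by omega) hWInv
        rw [pow_succ] at this
        exact this
      · -- A returns v - n here
        rw [aOuter_succ n target (j + 1), show n + (v - n) = v by ring, if_neg hcase]
        rw [show j + 1 + 2 = (j + 2) + 1 by omega, bLoop_succ n target (j + 2)]
        by_cases hmds : pyDigitSum (-(PySem.Int.floordiv (-n) ((10:Int)^k)) * (10:Int)^k) ≤ target
        · -- B also succeeds at level k, with the same candidate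
          have hmn : n < -(PySem.Int.floordiv (-n) ((10:Int)^k)) * (10:Int)^k := by
            rcases eq_or_lt_of_le hmge with he | h
            · exfalso; rw [← he] at hmds; omega
            · exact h
          have hmv : -(PySem.Int.floordiv (-n) ((10:Int)^k)) * (10:Int)^k = v := by
            rcases hInv with ⟨hd, h1, h2⟩ | ⟨s, ⟨hd, h1, h2⟩, hveq, hdss⟩
            · exact window_eq _ _ _ hP hmd hd (by omega) (by omega)
            · exfalso
              have he : -(PySem.Int.floordiv (-n) ((10:Int)^k)) * (10:Int)^k = s :=
                window_eq _ _ _ hP hmd hd (by omega) (by omega)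
              rw [he] at hmds; omega
          rw [if_pos hmds, hmv]
        · -- B fails at level k but its next candidate is exactly v
          rw [if_neg hmds]
          -- find u with v = u + 10^k, ds u > target
          have hu : ∃ u, (10 : Int) ^ k ∣ u ∧ n ≤ u ∧ v = u + 10 ^ k ∧ target < pyDigitSum u := by
            rcases hInv with ⟨hd, h1, h2⟩ | ⟨s, ⟨hd, h1, h2⟩, hveq, hdss⟩
            · by_cases hdn : (10 : Int) ^ k ∣ n
              · refine ⟨n, hdn, le_refl n, ?_, hds⟩
                exact (window_eq _ v (n + 10 ^ k) hP hd (dvd_add hdn dvd_rfl) (by omega) (by omega))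
              · exfalso
                have hmn : n < -(PySem.Int.floordiv (-n) ((10:Int)^k)) * (10:Int)^k :=
                  lt_of_le_of_ne hmge (fun h => hdn (h ▸ hmd))
                have he : -(PySem.Int.floordiv (-n) ((10:Int)^k)) * (10:Int)^k = v :=
                  window_eq _ _ _ hP hmd hd (by omega) (by omega)
                rw [he] at hmds
                omega
            · exact ⟨s, hd, le_of_lt h1, hveq, hdss⟩
          obtain ⟨u, hud, hun, hveq, huds⟩ := hu
          obtain ⟨b, hb⟩ := hud
          have hb1 : 1 ≤ b := by nlinarith
          have hcarry : (10 : Int) ∣ (b + 1) := by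
            refine ds_carry b target k hb1 ?_ ?_
            · rw [show b * 10 ^ k = u by rw [hb]; ring]; exact huds
            · rw [show (b + 1) * 10 ^ k = v by rw [hveq, hb]; ring]; omega
          obtain ⟨c, hc⟩ := hcarry
          have hvQD : ((10 : Int) ^ k * 10) ∣ v := by
            refine ⟨c, ?_⟩
            rw [hveq, hb, show (10:Int)^k * b + 10^k = 10^k * (b+1) by ring, hc]
            ring
          -- B's candidate at level k+1 is v, which succeeds
          have hQ : (0 : Int) < 10 ^ k * 10 := by positivity
          obtain ⟨hmd2, hmge2, hmlt2⟩ := bstep_m n ((10 : Int) ^ k * 10) hQ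
          have hm2 : -(PySem.Int.floordiv (-n) ((10:Int)^k * 10)) * ((10:Int)^k * 10) = v := by
            refine window_eq _ _ _ hQ hmd2 hvQD (by omega) (by omega)
          rw [show j + 2 = (j + 1) + 1 by omega, bLoop_succ n target (j + 1), hm2, if_pos (by omega)]

theorem min_non_negative_integer_to_make_beautiful_spec : Claim_equal_min_non_negative_integer_to_make_beautiful := by
  intro n target hDom hPre
  unfold Spec_min_non_negative_integer_to_make_beautiful
  obtain ⟨hn0, hPre2⟩ := hPre
  have hDom' : n ≤ 2147483648 := by
    simp only [Dom_min_non_negative_integer_to_make_beautiful, pvDomInt, Bool.and_eq_true,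
      decide_eq_true_eq] at hDom
    exact hDom.1.2
  have ht0 : 0 ≤ target := by rcases hPre2 with h | h <;> omega
  unfold min_non_negative_integer_to_make_beautiful min_non_negative_integer_to_make_beautiful_alt
  obtain ⟨hmd1, hmge1, hmlt1⟩ := bstep_m n 1 one_pos
  have hm1 : -(PySem.Int.floordiv (-n) 1) * 1 = n := by omega
  by_cases h0 : pyDigitSum n ≤ target
  · rw [if_pos h0, show (13:Nat) = 12 + 1 from rfl, bLoop_succ n target 12, hm1, if_pos h0]
    omega
  · rw [if_neg h0]
    have hds : target < pyDigitSum n := by omega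
    have hn1 : 1 ≤ n := by
      rcases eq_or_lt_of_le hn0 with he | h
      · exfalso
        have : pyDigitSum 0 = 0 := by decide
        rw [← he] at h0
        omega
      · omega
    have ht1 : 1 ≤ target := by
      rcases hPre2 with h | h
      · exact h
      · omega
    -- A's first iteration reaches the strict round-up to a multiple of 10
    obtain ⟨hTd, hTgt, hTle⟩ := next_strict n 10 (by norm_num)
    set T := n - n % 10 + 10 with hTdef
    have hinner : n + aInner n 10 (0 + 1) (1 * 10) = T := by
      refine inner_spec n 10 (0 + 1) 1 T one_pos (by simpa using hTd) (by omega) (by omega)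
        (one_dvd _) (by push_cast; omega)
    have hInvT : InvA n target 1 T := by
      left
      exact ⟨by rw [pow_one]; exact hTd, hTgt, by rw [pow_one]; omega⟩
    have hmain := main_loop n target hn1 hDom' ht1 hds 10 1 T (by norm_num) (by norm_num) hInvT
    -- A side
    rw [show (12:Nat) = 11 + 1 from rfl, aOuter_succ n target 11,
        show n + (0 : Int) = n by ring, if_pos hds]
    have hinner' : aInner n 10 (0 + 1) (1 * 10) = T - n := by omega
    rw [hinner']
    -- B side
    rw [show (13:Nat) = 12 + 1 from rfl, bLoop_succ n target 12, hm1, if_neg h0]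
    have e1 : (1 : Int) * 10 = (10 : Int) ^ 1 := by norm_num
    rw [e1]
    exact hmain
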